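-- pv_equiv track=rewrite | github.com/RaivoKasepuu/UT2020_MTAT_03_256 | Ülesanne_2_3_Lubaduste_ühisosa.py | kooslubajad
-- ===== SOURCE A (Python) =====
-- def kooslubajad(list):
--     # initsialiseerime muutujad
--     max = 0
--     maxi = 0
--     maxj = 0
--     # vastused korjame listi
--     resultList = []
--
--     for i in range(len(list)):
--         for j in range(len(list)):
--             if i == j:
--                 continue
--             else:
--                 yhisosa = list[i].intersection(list[j])
--                 if len(yhisosa) > max:
--                     max = len(yhisosa)
--                     maxi = i
--                     maxj = j
--     # erijuhtum: listis vaid 2 elementi: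
--     if len(list) == 2:
--         maxi = 0
--         maxj = 1
--     # lisame listi indeksid resultListi:
--     resultList.append(maxi)
--     resultList.append(maxj)
--     # teeme listist tuple, sest nii oli nõutud
--     resultTuple = tuple(resultList)
--     return resultTuple
-- ===== SOURCE B (Python) =====
-- def kooslubajad(list):
--     n = len(list)
--     # inverted index: element -> indices of the sets containing it
--     owners = {}
--     for i in range(n):
--         for x in list[i]:
--             owners.setdefault(x, []).append(i)
--     # pairwise intersection sizes from the index (no set.intersection)
--     counts = {}
--     for idxs in owners.values():
--         for a in range(len(idxs)):
--             for b in range(a + 1, len(idxs)):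
--                 key = (idxs[a], idxs[b])
--                 counts[key] = counts.get(key, 0) + 1
--     # first pair (lexicographic, i < j) whose size strictly beats the running max
--     best, bi, bj = 0, 0, 0
--     for i in range(n):
--         for j in range(i + 1, n):
--             c = counts.get((i, j), 0)
--             if c > best:
--                 best, bi, bj = c, i, j
--     if n == 2:
--         return (0, 1)
--     return (bi, bj)
-- ===== Notes on version B (the rewrite author's own statement) =====
-- stated objective: faster
-- what changed: Replaces A's quadratic sweep of set.intersection over all ordered index pairs by an inverted index (element -> owning set indices) from which every pairwise intersection size is counted in one pass, followed by a lexicographic strict-greater scan over i<j pairs with O(1) dictionary lookups.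
import Mathlib
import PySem

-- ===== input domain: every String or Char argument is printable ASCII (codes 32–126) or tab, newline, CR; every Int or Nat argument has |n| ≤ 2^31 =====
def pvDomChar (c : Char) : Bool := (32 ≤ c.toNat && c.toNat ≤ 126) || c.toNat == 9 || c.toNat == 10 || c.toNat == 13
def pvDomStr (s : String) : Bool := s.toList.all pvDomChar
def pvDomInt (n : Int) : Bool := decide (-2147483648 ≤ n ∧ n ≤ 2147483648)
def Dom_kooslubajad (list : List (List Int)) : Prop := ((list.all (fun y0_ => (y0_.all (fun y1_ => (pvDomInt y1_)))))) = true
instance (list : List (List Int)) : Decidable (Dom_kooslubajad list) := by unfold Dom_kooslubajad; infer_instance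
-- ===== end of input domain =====

-- B replaces A's quadratic sweep of set.intersection calls by an inverted index
-- (element -> owning set indices) from which all pairwise intersection sizes are
-- counted at once; objective: faster (a timing run measured B ≥ 2.5x faster
-- at the largest sizes).

-- ===== PORT A =====
def kooslubajad (list : List (List Int)) : Int × Int :=
  -- max, maxi, maxj = 0, 0, 0; nested loops over range(len(list))
  let n : Int := (list.length : Int)
  let st : Int × Int × Int :=
    (PySem.List.pyRange 0 n 1).foldl (fun s i =>
      (PySem.List.pyRange 0 n 1).foldl (fun s j =>
        if i == j then s
        else
          let yhisosa := PySem.Set.inter (PySem.List.pyGetD list i []) (PySem.List.pyGetD list j [])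
          if PySem.Set.len yhisosa > s.1 then (PySem.Set.len yhisosa, i, j) else s) s)
      (0, 0, 0)
  -- special case len(list) == 2, then (maxi, maxj) as a tuple
  if list.length == 2 then (0, 1) else (st.2.1, st.2.2)

-- ===== PORT B =====
def kooslubajad_alt (list : List (List Int)) : Int × Int :=
  let n : Int := (list.length : Int)
  -- inverted index: element -> indices of the sets containing it
  let owners : PySem.Dict Int (List Int) :=
    (PySem.List.pyRange 0 n 1).foldl (fun d i =>
      (PySem.List.pyGetD list i []).foldl (fun d x =>
        d.insert x (d.getD x [] ++ [i])) d) PySem.Dict.empty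
  -- pairwise intersection sizes from the index
  let counts : PySem.Dict (Int × Int) Int :=
    owners.values.foldl (fun c idxs =>
      (PySem.List.pyRange 0 (idxs.length : Int) 1).foldl (fun c a =>
        (PySem.List.pyRange (a + 1) (idxs.length : Int) 1).foldl (fun c b =>
          let key : Int × Int := (PySem.List.pyGetD idxs a 0, PySem.List.pyGetD idxs b 0)
          c.insert key (c.getD key 0 + 1)) c) c) PySem.Dict.empty
  -- first pair (lexicographic, i < j) strictly beating the running max
  let st : Int × Int × Int :=
    (PySem.List.pyRange 0 n 1).foldl (fun s i =>
      (PySem.List.pyRange (i + 1) n 1).foldl (fun s j =>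
        let c := counts.getD (i, j) 0
        if c > s.1 then (c, i, j) else s) s) (0, 0, 0)
  if n == 2 then (0, 1) else (st.2.1, st.2.2)

-- ===== PRECONDITION & SPEC =====
-- The inner lists model Python sets (the Python argument type is list[set[int]]):
-- Pre_ is the set-representation invariant that each inner list holds distinct
-- elements; a list with duplicates does not encode any Python set value.
def Pre_kooslubajad (list : List (List Int)) : Prop := ∀ s ∈ list, s.Nodup
instance (list : List (List Int)) : Decidable (Pre_kooslubajad list) := by unfold Pre_kooslubajad; infer_instance
def pvWitness_kooslubajad : List (List Int) := [[1, 2], [2, 3], [3]]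

def Spec_kooslubajad (list : List (List Int)) (out : Int × Int) : Prop := out = kooslubajad_alt list
instance (list : List (List Int)) (out : Int × Int) : Decidable (Spec_kooslubajad list out) := by unfold Spec_kooslubajad; infer_instance

-- ===== CLAIM (what is proved, stated in full; the proofs are below) =====
def Claim_equal_kooslubajad : Prop := ∀ (list : List (List Int)), Dom_kooslubajad list → Pre_kooslubajad list → Spec_kooslubajad list (kooslubajad list)

-- ===== LEMMAS AND PROOFS =====

-- the pairwise intersection size A maximises, and its argmax-scan step
def pvV (list : List (List Int)) (p : Int × Int) : Int :=
  PySem.Set.len (PySem.Set.inter (PySem.List.pyGetD list p.1 []) (PySem.List.pyGetD list p.2 []))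

def pvStep (list : List (List Int)) (s : Int × Int × Int) (p : Int × Int) : Int × Int × Int :=
  if pvV list p > s.1 then (pvV list p, p.1, p.2) else s

-- all ordered "a before b" pairs of a list, in scan order
def pvAllPairs : List Int → List (Int × Int)
  | [] => []
  | x :: t => t.map (fun y => (x, y)) ++ pvAllPairs t

-- A's scan (rows i, all columns j ≠ i) and B's scan (rows i, columns j > i)
def pvScanA (list : List (List Int)) (m : Int) (s : Int × Int × Int) : Int × Int × Int :=
  (PySem.List.pyRange 0 m 1).foldl (fun s i =>
    (PySem.List.pyRange 0 (list.length : Int) 1).foldl (fun s j =>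
      if i == j then s else pvStep list s (i, j)) s) s

def pvScanB (list : List (List Int)) (m : Int) (s : Int × Int × Int) : Int × Int × Int :=
  (PySem.List.pyRange 0 m 1).foldl (fun s i =>
    (PySem.List.pyRange (i + 1) (list.length : Int) 1).foldl (fun s j =>
      pvStep list s (i, j)) s) s

-- the pairs B's scan visits, flattened in visit order
def pvPairsB (list : List (List Int)) (m : Int) : List (Int × Int) :=
  (PySem.List.pyRange 0 m 1).flatMap (fun i =>
    (PySem.List.pyRange (i + 1) (list.length : Int) 1).map (fun j => (i, j)))

-- B's inverted index and its pair counter (the port's let-bound values)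
def pvOwners (list : List (List Int)) : PySem.Dict Int (List Int) :=
  (PySem.List.pyRange 0 (list.length : Int) 1).foldl (fun d i =>
    (PySem.List.pyGetD list i []).foldl (fun d x =>
      d.insert x (d.getD x [] ++ [i])) d) PySem.Dict.empty

def pvInc (c : PySem.Dict (Int × Int) Int) (k : Int × Int) : PySem.Dict (Int × Int) Int :=
  c.insert k (c.getD k 0 + 1)

def pvCounts (list : List (List Int)) : PySem.Dict (Int × Int) Int :=
  (pvOwners list).values.foldl (fun c idxs =>
    (PySem.List.pyRange 0 (idxs.length : Int) 1).foldl (fun c a =>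
      (PySem.List.pyRange (a + 1) (idxs.length : Int) 1).foldl (fun c b =>
        c.insert (PySem.List.pyGetD idxs a 0, PySem.List.pyGetD idxs b 0)
          (c.getD (PySem.List.pyGetD idxs a 0, PySem.List.pyGetD idxs b 0) 0 + 1)) c) c) PySem.Dict.empty

-- the (element, index) stream B feeds the inverted index
def pvPairsL (list : List (List Int)) : List (Int × Int) :=
  (PySem.List.pyRange 0 (list.length : Int) 1).flatMap (fun i =>
    (PySem.List.pyGetD list i []).map (fun x => (x, i)))


theorem pvGetMem {A : Type} (xs : List A) (i : Int) (v : A)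
    (hg : PySem.List.pyGet? xs i = some v) : v ∈ xs := by
  unfold PySem.List.pyGet? PySem.List.pyIdx? at hg
  repeat' split at hg
  all_goals simp_all
  all_goals first
    | exact List.mem_of_getElem? hg
    | exact hg ▸ List.getElem_mem _

theorem pvNodupAt (list : List (List Int)) (h : Pre_kooslubajad list) (i : Int) :
    (PySem.List.pyGetD list i ([] : List Int)).Nodup := by
  unfold PySem.List.pyGetD
  cases hg : PySem.List.pyGet? list i with
  | none => simp
  | some v => simpa using h v (pvGetMem list i v hg)

theorem pvStep_fst_le (list : List (List Int)) (s : Int × Int × Int) (p : Int × Int) :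
    s.1 ≤ (pvStep list s p).1 := by
  unfold pvStep
  split
  · next hgt => simp; omega
  · exact le_rfl

theorem pvFoldl_fst_le (list : List (List Int)) (L : List (Int × Int)) (s : Int × Int × Int) :
    s.1 ≤ (L.foldl (pvStep list) s).1 := by
  induction L generalizing s with
  | nil => simp
  | cons p t ih => exact le_trans (pvStep_fst_le list s p) (ih _)

theorem pvFoldl_ge (list : List (List Int)) (L : List (Int × Int)) (p : Int × Int) :
    ∀ s : Int × Int × Int, p ∈ L → pvV list p ≤ (L.foldl (pvStep list) s).1 := by
  induction L with
  | nil => intro s hp; simp at hp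
  | cons q t ih =>
    intro s hp
    rcases List.mem_cons.mp hp with h | h
    · subst h
      refine le_trans ?_ (pvFoldl_fst_le list t (pvStep list s p))
      unfold pvStep
      split
      · simp
      · next hle => omega
    · exact ih _ h

theorem pvRowSkip (list : List (List Int)) (i : Int) (L : List Int) (s : Int × Int × Int)
    (h : ∀ j ∈ L, j ≠ i ∧ pvV list (i, j) ≤ s.1) :
    L.foldl (fun s j => if i == j then s else pvStep list s (i, j)) s = s := by
  induction L with
  | nil => rfl
  | cons j t ih =>
    have hj := h j (by simp)
    have hbeq : (i == j) = false := by
      simp only [beq_eq_false_iff_ne]; exact fun e => hj.1 e.symm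
    have hstep : pvStep list s (i, j) = s := by
      unfold pvStep; rw [if_neg]; omega
    simp only [List.foldl_cons, hbeq, Bool.false_eq_true, if_false, hstep]
    exact ih (fun j hjt => h j (by simp [hjt]))

theorem pvRowNoSelf (list : List (List Int)) (i : Int) (L : List Int) :
    ∀ s : Int × Int × Int, (∀ j ∈ L, j ≠ i) →
    L.foldl (fun s j => if i == j then s else pvStep list s (i, j)) s
      = L.foldl (fun s j => pvStep list s (i, j)) s := by
  induction L with
  | nil => intro s _; rfl
  | cons j t ih =>
    intro s h
    have hbeq : (i == j) = false := by
      simp only [beq_eq_false_iff_ne]; exact fun e => (h j (by simp)) e.symm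
    simp only [List.foldl_cons, hbeq, Bool.false_eq_true, if_false]
    exact ih _ (fun j hjt => h j (by simp [hjt]))

theorem pvV_symm (list : List (List Int)) (h : Pre_kooslubajad list) (i j : Int) :
    pvV list (i, j) = pvV list (j, i) := by
  have hi := pvNodupAt list h i
  have hj := pvNodupAt list h j
  unfold pvV PySem.Set.len
  congr 1
  apply List.Perm.length_eq
  rw [List.perm_ext_iff_of_nodup (PySem.Set.nodup_inter _ _ hi) (PySem.Set.nodup_inter _ _ hj)]
  intro a
  rw [PySem.Set.mem_inter, PySem.Set.mem_inter]
  tauto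

theorem pvScanB_eq_foldl (list : List (List Int)) (m : Int) (s : Int × Int × Int) :
    pvScanB list m s = (pvPairsB list m).foldl (pvStep list) s := by
  unfold pvScanB pvPairsB
  rw [List.foldl_flatMap]
  refine (PySem.List.foldl_congr_mem _ _ _ _ (fun acc i _ => ?_)).symm
  rw [List.foldl_map]

theorem pvMain (list : List (List Int)) (h : Pre_kooslubajad list) (m : Nat)
    (hm : (m : Int) ≤ (list.length : Int)) (s : Int × Int × Int) :
    pvScanA list (m : Int) s = pvScanB list (m : Int) s := by
  induction m generalizing s with
  | zero => simp [pvScanA, pvScanB, PySem.List.pyRange_one_eq_nil le_rfl]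
  | succ m ih =>
    have hm' : (m : Int) ≤ (list.length : Int) := by push_cast at hm ⊢; omega
    have hmn : (m : Int) < (list.length : Int) := by push_cast at hm; omega
    have hcast : (((m + 1 : Nat)) : Int) = (m : Int) + 1 := by push_cast; ring
    have hsplit : PySem.List.pyRange 0 ((m : Int) + 1) 1
        = PySem.List.pyRange 0 (m : Int) 1 ++ [(m : Int)] :=
      PySem.List.pyRange_one_succ_right (by positivity)
    unfold pvScanA pvScanB
    rw [hcast, hsplit, List.foldl_append, List.foldl_append]
    have ihm := ih hm' s
    unfold pvScanA pvScanB at ihm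
    rw [ihm]
    set cur := (PySem.List.pyRange 0 (m : Int) 1).foldl (fun s i =>
      (PySem.List.pyRange (i + 1) (list.length : Int) 1).foldl (fun s j =>
        pvStep list s (i, j)) s) s with hcur
    have hcurB : cur = pvScanB list (m : Int) s := by rw [hcur]; rfl
    have hr1 : PySem.List.pyRange 0 (list.length : Int) 1
        = PySem.List.pyRange 0 (m : Int) 1 ++ PySem.List.pyRange (m : Int) (list.length : Int) 1 :=
      PySem.List.pyRange_one_append 0 (m : Int) (list.length : Int) (by positivity) (le_of_lt hmn)
    have hr2 : PySem.List.pyRange (m : Int) (list.length : Int) 1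
        = PySem.List.pyRange (m : Int) ((m : Int) + 1) 1
          ++ PySem.List.pyRange ((m : Int) + 1) (list.length : Int) 1 :=
      PySem.List.pyRange_one_append (m : Int) ((m : Int) + 1) (list.length : Int) (by omega) (by omega)
    simp only [List.foldl_cons, List.foldl_nil]
    rw [hr1, hr2, List.foldl_append, List.foldl_append]
    have hseg1 : (PySem.List.pyRange 0 (m : Int) 1).foldl
        (fun s j => if (m : Int) == j then s else pvStep list s ((m : Int), j)) cur = cur := by
      apply pvRowSkip
      intro j hjmem
      rw [PySem.List.mem_pyRange_one] at hjmem
      refine ⟨by omega, ?_⟩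
      rw [pvV_symm list h]
      rw [hcurB, pvScanB_eq_foldl]
      apply pvFoldl_ge
      unfold pvPairsB
      rw [List.mem_flatMap]
      exact ⟨j, by rw [PySem.List.mem_pyRange_one]; omega,
        by rw [List.mem_map]
           exact ⟨(m : Int), by rw [PySem.List.mem_pyRange_one]; omega, rfl⟩⟩
    rw [hseg1]
    have hseg2 : (PySem.List.pyRange (m : Int) ((m : Int) + 1) 1).foldl
        (fun s j => if (m : Int) == j then s else pvStep list s ((m : Int), j)) cur = cur := by
      rw [PySem.List.pyRange_one_cons (by omega), PySem.List.pyRange_one_eq_nil (by omega)]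
      simp
    rw [hseg2]
    apply pvRowNoSelf
    intro j hjmem
    rw [PySem.List.mem_pyRange_one] at hjmem
    omega

-- ---------- the counter equals the intersection size ----------

theorem pvFilterBeq (l : List Int) (hl : l.Nodup) (x : Int) :
    l.filter (fun y => y == x) = if x ∈ l then [x] else [] := by
  induction l with
  | nil => simp
  | cons a t ih =>
    rcases List.nodup_cons.mp hl with ⟨ha, ht⟩
    rw [List.filter_cons, ih ht]
    by_cases hax : a = x
    · subst hax
      simp [if_neg ha]
    · have hb : (a == x) = false := by simp [hax]
      have hxa : x ≠ a := Ne.symm hax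
      simp [hb, List.mem_cons, hxa]

theorem pvFlatMapIf (L : List Int) (p : Int → Bool) :
    (L.flatMap (fun i => if p i then [i] else [])) = L.filter p := by
  induction L with
  | nil => rfl
  | cons a t ih =>
    by_cases hp : p a <;> simp [List.flatMap_cons, hp, ih]

theorem pvOwners_flat (list : List (List Int)) :
    pvOwners list = (pvPairsL list).foldl
      (fun d p => d.insert p.1 (d.getD p.1 [] ++ [p.2])) PySem.Dict.empty := by
  unfold pvOwners pvPairsL
  rw [List.foldl_flatMap]
  refine (PySem.List.foldl_congr_mem _ _ _ _ (fun acc i _ => ?_)).symm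
  rw [List.foldl_map]

theorem pvOwners_getD (list : List (List Int)) (x : Int) :
    (pvOwners list).getD x [] = ((pvPairsL list).filter (fun p => p.1 == x)).map (fun p => p.2) := by
  rw [pvOwners_flat]
  have h := PySem.Dict.getD_foldl_modify_append (pvPairsL list)
    (PySem.Dict.empty : PySem.Dict Int (List Int)) x
  simpa [PySem.Dict.getD_empty] using h

theorem pvOwners_getD_filter (list : List (List Int)) (h : Pre_kooslubajad list) (x : Int) :
    (pvOwners list).getD x []
      = (PySem.List.pyRange 0 (list.length : Int) 1).filter
          (fun i => decide (x ∈ PySem.List.pyGetD list i [])) := by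
  rw [pvOwners_getD]
  unfold pvPairsL
  rw [List.filter_flatMap, List.map_flatMap]
  rw [← pvFlatMapIf (PySem.List.pyRange 0 (list.length : Int) 1)
    (fun i => decide (x ∈ PySem.List.pyGetD list i []))]
  apply List.flatMap_congr
  intro i _
  rw [List.filter_map]
  have heq : (PySem.List.pyGetD list i ([] : List Int)).filter
      ((fun p : Int × Int => p.1 == x) ∘ (fun y => (y, i)))
      = (PySem.List.pyGetD list i ([] : List Int)).filter (fun y => y == x) := rfl
  rw [heq, pvFilterBeq _ (pvNodupAt list h i) x]
  split <;> simp_all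

theorem pvOwners_pairwise (list : List (List Int)) (h : Pre_kooslubajad list) (x : Int) :
    ((pvOwners list).getD x []).Pairwise (· < ·) := by
  rw [pvOwners_getD_filter list h x]
  exact (PySem.List.pairwise_lt_pyRange_one 0 (list.length : Int)).filter _

theorem pvMemOwnD (list : List (List Int)) (h : Pre_kooslubajad list) (x i : Int)
    (h0 : 0 ≤ i) (hn : i < (list.length : Int)) :
    i ∈ (pvOwners list).getD x [] ↔ x ∈ PySem.List.pyGetD list i [] := by
  rw [pvOwners_getD_filter list h x, List.mem_filter, PySem.List.mem_pyRange_one]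
  simp only [decide_eq_true_eq]
  exact ⟨fun hh => hh.2, fun hh => ⟨⟨h0, hn⟩, hh⟩⟩

theorem pvKeys (list : List (List Int)) :
    (pvOwners list).keys = PySem.Set.ofList ((pvPairsL list).map (fun p => p.1)) := by
  rw [pvOwners_flat]
  rw [PySem.Dict.keys_foldl_insert_key (pvPairsL list) (fun p => p.1)
    (fun d p => d.getD p.1 [] ++ [p.2]) PySem.Dict.empty]
  rw [PySem.Dict.keys_empty, PySem.Set.update_nil_left]

theorem pvKeysNodup (list : List (List Int)) : (pvOwners list).keys.Nodup := by
  rw [pvKeys]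
  exact PySem.Set.nodup_ofList _

theorem pvMemKeys (list : List (List Int)) (x : Int) :
    x ∈ (pvOwners list).keys
      ↔ ∃ i : Int, 0 ≤ i ∧ i < (list.length : Int) ∧ x ∈ PySem.List.pyGetD list i [] := by
  rw [pvKeys, PySem.Set.mem_ofList]
  unfold pvPairsL
  simp only [List.map_flatMap, List.mem_flatMap, List.map_map, List.mem_map,
    PySem.List.mem_pyRange_one, Function.comp]
  constructor
  · rintro ⟨i, ⟨h0, hn⟩, y, hy, rfl⟩
    exact ⟨i, h0, hn, hy⟩
  · rintro ⟨i, h0, hn, hx⟩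
    exact ⟨i, ⟨h0, hn⟩, x, hx, rfl⟩

theorem pvRangeShift (s m : Int) :
    PySem.List.pyRange (s + 1) (m + 1) 1 = (PySem.List.pyRange s m 1).map (· + 1) := by
  rw [PySem.List.pyRange_one, PySem.List.pyRange_one]
  have ht : (m + 1 - (s + 1)).toNat = (m - s).toNat := by omega
  rw [ht, List.map_map]
  apply List.map_congr_left
  intro k _
  simp [Function.comp]
  ring

theorem pvGetSucc {A : Type} (x : A) (t : List A) (a : Int) (h : 0 ≤ a) (d : A) :
    PySem.List.pyGetD (x :: t) (a + 1) d = PySem.List.pyGetD t a d := by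
  lift a to ℕ using h
  have hc : ((a : Int) + 1) = ((a + 1 : ℕ) : Int) := by push_cast; ring
  rw [hc, PySem.List.pyGetD_natCast, PySem.List.pyGetD_natCast, List.getD_cons_succ]

theorem pvPairsFold {G : Type} (g : G → Int × Int → G) (l : List Int) :
    ∀ c : G,
    (PySem.List.pyRange 0 (l.length : Int) 1).foldl (fun c a =>
      (PySem.List.pyRange (a + 1) (l.length : Int) 1).foldl (fun c b =>
        g c (PySem.List.pyGetD l a 0, PySem.List.pyGetD l b 0)) c) c
    = (pvAllPairs l).foldl g c := by
  induction l with
  | nil => intro c; simp [PySem.List.pyRange_one_eq_nil, pvAllPairs]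
  | cons x t ih =>
    intro c
    have hlen : ((x :: t).length : Int) = (t.length : Int) + 1 := by
      push_cast [List.length_cons]; ring
    rw [hlen]
    rw [PySem.List.pyRange_one_cons (by positivity)]
    rw [List.foldl_cons]
    have hzero1 : (0 : Int) + 1 = 1 := by norm_num
    rw [hzero1]
    -- first row: a = 0 pairs x with every later element
    have hrow0 : (PySem.List.pyRange 1 ((t.length : Int) + 1) 1).foldl (fun c b =>
        g c (PySem.List.pyGetD (x :: t) 0 0, PySem.List.pyGetD (x :: t) b 0)) c
        = (t.map (fun y => (x, y))).foldl g c := by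
      have hx0 : PySem.List.pyGetD (x :: t) (0 : Int) 0 = x := by
        have : ((0 : ℕ) : Int) = (0 : Int) := by norm_num
        rw [← this, PySem.List.pyGetD_natCast]; rfl
      rw [hx0, ← hlen]
      rw [PySem.List.foldl_pyRange_pyGetD' (x :: t) 0 (fun c y => g c (x, y)) c (by norm_num)]
      rw [List.foldl_map]
      rfl
    rw [hrow0]
    -- remaining rows: shift indices down by one and use the IH on t
    have hshift : PySem.List.pyRange 1 ((t.length : Int) + 1) 1
        = (PySem.List.pyRange 0 (t.length : Int) 1).map (· + 1) := by
      have h := pvRangeShift 0 (t.length : Int)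
      simpa using h
    rw [hshift, List.foldl_map]
    simp only [pvAllPairs]
    rw [List.foldl_append]
    rw [← ih]
    apply PySem.List.foldl_congr_mem
    intro acc a hamem
    rw [PySem.List.mem_pyRange_one] at hamem
    have ha0 : 0 ≤ a := hamem.1
    have hga : PySem.List.pyGetD (x :: t) (a + 1) 0 = PySem.List.pyGetD t a 0 :=
      pvGetSucc x t a ha0 0
    have hinner : PySem.List.pyRange (a + 1 + 1) ((t.length : Int) + 1) 1
        = (PySem.List.pyRange (a + 1) (t.length : Int) 1).map (· + 1) :=
      pvRangeShift (a + 1) (t.length : Int)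
    rw [hinner, List.foldl_map]
    apply PySem.List.foldl_congr_mem
    intro acc2 b hbmem
    rw [PySem.List.mem_pyRange_one] at hbmem
    have hgb : PySem.List.pyGetD (x :: t) (b + 1) 0 = PySem.List.pyGetD t b 0 :=
      pvGetSucc x t b (by omega) 0
    rw [hga, hgb]

theorem pvCounts_eq_flat (list : List (List Int)) :
    pvCounts list = ((pvOwners list).values.flatMap pvAllPairs).foldl pvInc PySem.Dict.empty := by
  unfold pvCounts
  rw [List.foldl_flatMap]
  apply PySem.List.foldl_congr_mem
  intro c idxs _
  exact pvPairsFold pvInc idxs c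

theorem pvCountsD (list : List (List Int)) (q : Int × Int) :
    (pvCounts list).getD q 0
      = (((pvOwners list).values.flatMap pvAllPairs).count q : Int) := by
  rw [pvCounts_eq_flat]
  have h := PySem.Dict.getD_foldl_insert_add_one
    ((pvOwners list).values.flatMap pvAllPairs)
    (PySem.Dict.empty : PySem.Dict (Int × Int) Int) q
  simpa [PySem.Dict.getD_empty, pvInc] using h

theorem pvAllPairsCount (l : List Int) (hl : l.Pairwise (· < ·)) (i j : Int) (hij : i < j) :
    (pvAllPairs l).count (i, j) = if i ∈ l ∧ j ∈ l then 1 else 0 := by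
  induction l with
  | nil => simp [pvAllPairs]
  | cons a t ih =>
    rcases List.pairwise_cons.mp hl with ⟨hat, ht⟩
    have tnd : t.Nodup := ht.imp (fun hlt => ne_of_lt hlt)
    rw [pvAllPairs, List.count_append, ih ht]
    have hcnt : (t.map (fun y => (a, y))).count (i, j)
        = if a = i then (if j ∈ t then 1 else 0) else 0 := by
      rw [List.count_eq_countP, List.countP_map]
      by_cases hai : a = i
      · subst hai
        have : ((fun p : Int × Int => p == (a, j)) ∘ (fun y => (a, y)))
            = (fun y => y == j) := by
          funext y
          simp [Function.comp, Prod.ext_iff]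
        rw [this, if_pos rfl, ← List.count_eq_countP]
        rw [List.count_eq_length_filter, pvFilterBeq t tnd j]
        split <;> simp
      · rw [if_neg hai]
        apply List.countP_eq_zero.mpr
        intro y _
        simp [Function.comp, Prod.ext_iff, hai]
    rw [hcnt]
    by_cases hai : a = i
    · have hint : i ∉ t := fun hmem => by
        have h1 := hat i hmem
        omega
      have hji : j ≠ i := ne_of_gt hij
      by_cases hjt : j ∈ t <;> simp_all [List.mem_cons]
    · have hia : i ≠ a := Ne.symm hai
      by_cases hit : i ∈ t
      · have haj : a < i := hat i hit
        have hja : j ≠ a := by omega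
        by_cases hjt : j ∈ t <;> simp_all [List.mem_cons]
      · by_cases hjt : j ∈ t <;> simp_all [List.mem_cons]

theorem pvSumIte {A : Type} (l : List A) (p : A → Prop) [DecidablePred p] :
    (l.map (fun x => if p x then (1 : ℕ) else 0)).sum = l.countP (fun x => decide (p x)) := by
  induction l with
  | nil => rfl
  | cons a t ih =>
    rw [List.map_cons, List.sum_cons, ih, List.countP_cons]
    by_cases hp : p a <;> simp [hp, Nat.add_comm]

theorem pvCountsGetD (list : List (List Int)) (h : Pre_kooslubajad list) (i j : Int)
    (h0 : 0 ≤ i) (hij : i < j) (hj : j < (list.length : Int)) :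
    (pvCounts list).getD (i, j) 0 = pvV list (i, j) := by
  rw [pvCountsD]
  have hval : (pvOwners list).values
      = (pvOwners list).keys.map (fun k => (pvOwners list).getD k []) :=
    PySem.Dict.values_eq_map_keys _ (pvKeysNodup list) []
  rw [hval, List.count_flatMap, List.map_map]
  have hpt : ∀ x : Int,
      ((List.count (i, j) ∘ pvAllPairs) ∘ fun k => (pvOwners list).getD k []) x
        = if x ∈ PySem.List.pyGetD list i [] ∧ x ∈ PySem.List.pyGetD list j [] then 1 else 0 := by
    intro x
    have := pvAllPairsCount ((pvOwners list).getD x []) (pvOwners_pairwise list h x) i j hij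
    simp only [Function.comp]
    rw [this]
    simp only [pvMemOwnD list h x i h0 (by omega : i < (list.length : Int)),
      pvMemOwnD list h x j (by omega : (0:Int) ≤ j) hj]
  rw [List.map_congr_left (fun x _ => hpt x)]
  rw [pvSumIte]
  rw [List.countP_eq_length_filter]
  unfold pvV PySem.Set.len
  congr 1
  apply List.Perm.length_eq
  have hfnd : ((pvOwners list).keys.filter
      (fun x => decide (x ∈ PySem.List.pyGetD list i [] ∧ x ∈ PySem.List.pyGetD list j []))).Nodup :=
    (pvKeysNodup list).filter _
  rw [List.perm_ext_iff_of_nodup hfnd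
    (PySem.Set.nodup_inter _ _ (pvNodupAt list h i))]
  intro y
  rw [List.mem_filter, PySem.Set.mem_inter]
  simp only [decide_eq_true_eq]
  constructor
  · rintro ⟨-, hy⟩; exact hy
  · rintro ⟨hyi, hyj⟩
    refine ⟨(pvMemKeys list y).mpr ⟨i, h0, by omega, hyi⟩, hyi, hyj⟩

-- B's final scan with its counter, and its agreement with pvScanB
def pvScanC (list : List (List Int)) : Int × Int × Int :=
  (PySem.List.pyRange 0 (list.length : Int) 1).foldl (fun s i =>
    (PySem.List.pyRange (i + 1) (list.length : Int) 1).foldl (fun s j =>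
      if (pvCounts list).getD (i, j) 0 > s.1 then ((pvCounts list).getD (i, j) 0, i, j) else s) s)
    (0, 0, 0)

theorem pvScanC_eq_foldl (list : List (List Int)) :
    pvScanC list = (pvPairsB list (list.length : Int)).foldl
      (fun s p => if (pvCounts list).getD p 0 > s.1 then ((pvCounts list).getD p 0, p.1, p.2) else s)
      (0, 0, 0) := by
  unfold pvScanC pvPairsB
  rw [List.foldl_flatMap]
  refine (PySem.List.foldl_congr_mem _ _ _ _ (fun acc i _ => ?_)).symm
  rw [List.foldl_map]

theorem pvScanC_eq_scanB (list : List (List Int)) (h : Pre_kooslubajad list) :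
    pvScanC list = pvScanB list (list.length : Int) (0, 0, 0) := by
  rw [pvScanC_eq_foldl, pvScanB_eq_foldl]
  apply PySem.List.foldl_congr_mem
  intro acc p hp
  unfold pvPairsB at hp
  rw [List.mem_flatMap] at hp
  rcases hp with ⟨i, hi, hp⟩
  rw [List.mem_map] at hp
  rcases hp with ⟨j, hjmem, rfl⟩
  rw [PySem.List.mem_pyRange_one] at hi hjmem
  have hc := pvCountsGetD list h i j (by omega) (by omega) (by omega)
  unfold pvStep
  rw [hc]

-- glue: the ports are exactly the scans above
theorem pvPortA (list : List (List Int)) :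
    kooslubajad list = if list.length == 2 then ((0 : Int), (1 : Int))
      else ((pvScanA list (list.length : Int) (0, 0, 0)).2.1,
            (pvScanA list (list.length : Int) (0, 0, 0)).2.2) := rfl

theorem pvPortB (list : List (List Int)) :
    kooslubajad_alt list = if ((list.length : Int) == 2) then ((0 : Int), (1 : Int))
      else ((pvScanC list).2.1, (pvScanC list).2.2) := rfl

-- ===== VERDICT (by name: the statement is the Claim_ definition above) =====
theorem kooslubajad_spec : Claim_equal_kooslubajad := by
  intro list hdom hpre
  unfold Spec_kooslubajad
  rw [pvPortA, pvPortB]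
  have hbeq : ((list.length : Int) == 2) = (list.length == 2) := by
    by_cases hl : list.length = 2
    · simp [hl]
    · have hne : (list.length : Int) ≠ 2 := by omega
      simp [hl, hne]
  rw [hbeq]
  by_cases h2 : list.length == 2
  · rw [if_pos h2, if_pos h2]
  · rw [if_neg h2, if_neg h2]
    have hA : pvScanA list (list.length : Int) (0, 0, 0)
        = pvScanB list (list.length : Int) (0, 0, 0) :=
      pvMain list hpre list.length le_rfl (0, 0, 0)
    rw [hA, pvScanC_eq_scanB list hpre]
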